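-- pv_equiv track=rewrite | github.com/kewos554321/MyPythonExercise | LabProject/mylabtool/tests/CPETool/CPETool.py | get_predictanswer_info
-- ===== SOURCE A (Python) =====
-- def get_predictanswer_info(value):
--     predictanswer = {} # pre
--     for i in range(len(value)):
--         sample = 's' + str(i)
--         group = value[i]
--         if group not in predictanswer:
--             predictanswer[group] = set()
--         predictanswer[group].add(sample)
--     predictanswer_length = len(predictanswer) # prel
--     predictanswer_keysorted = sorted(predictanswer) # pres
--     return (predictanswer, predictanswer_length, predictanswer_keysorted)
-- ===== SOURCE B (Python) =====
-- def get_predictanswer_info(value):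
--     order = list(dict.fromkeys(value))
--     predictanswer = {
--         g: {'s' + str(i) for i, v in enumerate(value) if v == g}
--         for g in order
--     }
--     return (predictanswer, len(predictanswer), sorted(order))
-- ===== Notes on version B (the rewrite author's own statement) =====
-- stated objective: simpler
-- what changed: Replaces the single-pass loop that mutates a dict of sets with a dedup of the values (first-occurrence key order) followed by one set comprehension over enumerate(value) per distinct key.
import Mathlib
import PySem

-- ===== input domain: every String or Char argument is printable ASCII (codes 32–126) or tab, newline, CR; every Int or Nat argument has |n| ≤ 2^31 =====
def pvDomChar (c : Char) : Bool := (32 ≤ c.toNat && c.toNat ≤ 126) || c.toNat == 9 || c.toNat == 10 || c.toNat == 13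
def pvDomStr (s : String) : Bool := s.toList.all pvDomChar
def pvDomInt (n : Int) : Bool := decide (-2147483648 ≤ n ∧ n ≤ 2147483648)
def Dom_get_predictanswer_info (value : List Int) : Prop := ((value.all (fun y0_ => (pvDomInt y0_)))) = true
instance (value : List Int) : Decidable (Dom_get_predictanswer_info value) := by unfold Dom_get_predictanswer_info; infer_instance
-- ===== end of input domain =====

-- B replaces A's single-pass dict-of-sets mutation loop by an ordered dedup of the values
-- followed by one set comprehension over enumerate(value) per distinct key (objective: simpler, not faster).


-- ===== PORT A =====
def get_predictanswer_info (value : List Int) : (List (Int × List String)) × Int × List Int :=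
  let predictanswer : PySem.Dict Int (PySem.Set String) :=
    (PySem.List.pyRange 0 value.length 1).foldl (fun d i =>
      let sample := "s" ++ PySem.Int.toStr i
      let group := PySem.List.pyGetD value i 0   -- value[i]: i ranges over range(len(value)), always in range
      let d := if d.contains group then d else d.insert group PySem.Set.empty
      d.modify group PySem.Set.empty (fun s => PySem.Set.add s sample)) PySem.Dict.empty
  let predictanswer_length : Int := (PySem.Dict.size predictanswer : Int)
  let predictanswer_keysorted := PySem.List.sorted predictanswer.keys (fun x => x) false
  (predictanswer.items, predictanswer_length, predictanswer_keysorted)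

-- ===== PORT B =====
def get_predictanswer_info_alt (value : List Int) : (List (Int × List String)) × Int × List Int :=
  let order := PySem.List.dedup value
  let predictanswer : List (Int × PySem.Set String) :=
    order.map (fun g =>
      (g, PySem.Set.ofList (((PySem.List.enumerate value 0).filter
            (fun p => p.2 == g)).map (fun p => "s" ++ PySem.Int.toStr p.1))))
  (predictanswer, (predictanswer.length : Int), PySem.List.sorted order (fun x => x) false)

-- ===== PRECONDITION & SPEC =====
def Spec_get_predictanswer_info (value : List Int) (out : (List (Int × List String)) × Int × List Int) : Prop := out = get_predictanswer_info_alt value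
instance (value : List Int) (out : (List (Int × List String)) × Int × List Int) : Decidable (Spec_get_predictanswer_info value out) := by unfold Spec_get_predictanswer_info; infer_instance

-- ===== CLAIM (what is proved, stated in full; the proofs are below) =====
def Claim_equal_get_predictanswer_info : Prop := ∀ (value : List Int), Dom_get_predictanswer_info value → Spec_get_predictanswer_info value (get_predictanswer_info value)

-- ===== LEMMAS AND PROOFS =====

-- A's loop body, as a step over an (index, group) pair
def pvStep (d : PySem.Dict Int (PySem.Set String)) (p : Int × Int) : PySem.Dict Int (PySem.Set String) :=
  let sample := "s" ++ PySem.Int.toStr p.1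
  let group := p.2
  let d := if d.contains group then d else d.insert group PySem.Set.empty
  d.modify group PySem.Set.empty (fun s => PySem.Set.add s sample)

-- the samples of group g drawn from a list of (index, group) pairs
def pvGrp (l : List (Int × Int)) (g : Int) : List String :=
  (l.filter (fun p => p.2 == g)).map (fun p => "s" ++ PySem.Int.toStr p.1)

-- the grouped association list both programs produce
def pvTab (l : List (Int × Int)) : List (Int × PySem.Set String) :=
  (PySem.List.dedup (l.map (·.2))).map (fun g => (g, PySem.Set.ofList (pvGrp l g)))

theorem pvDict_ext {κ ν : Type} (d e : PySem.Dict κ ν) (h : d.items = e.items) : d = e := by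
  cases d; cases e; simpa [PySem.Dict.items] using h

theorem pvGrp_append_singleton (l : List (Int × Int)) (i g k : Int) :
    pvGrp (l ++ [(i, g)]) k = pvGrp l k ++ (if k = g then ["s" ++ PySem.Int.toStr i] else []) := by
  unfold pvGrp
  rw [List.filter_append, List.map_append]
  by_cases h : k = g
  · subst h; rw [if_pos rfl]
    norm_num [List.filter]
  · rw [if_neg h]
    have : ((g : Int) == k) = false := by simpa using Ne.symm h
    norm_num [List.filter, this]

theorem pvGrp_nil_of_not_mem (l : List (Int × Int)) (g : Int) (h : g ∉ l.map (·.2)) :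
    pvGrp l g = [] := by
  simp only [pvGrp, List.map_eq_nil_iff, List.filter_eq_nil_iff]
  intro p hp hbeq
  exact h (List.mem_map.mpr ⟨p, hp, by simpa using hbeq⟩)

theorem pvTab_keys (l : List (Int × Int)) :
    (PySem.Dict.mk (pvTab l)).keys = PySem.List.dedup (l.map (·.2)) := by
  simp [PySem.Dict.keys, pvTab, List.map_map, Function.comp_def]

theorem pvTab_contains (l : List (Int × Int)) (g : Int) :
    (PySem.Dict.mk (pvTab l)).contains g = true ↔ g ∈ l.map (·.2) := by
  simp [PySem.Dict.contains, pvTab, List.any_eq_true, PySem.List.dedup_eq_ofList,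
    PySem.Set.mem_ofList]

theorem pvTab_getD (l : List (Int × Int)) (g : Int) (h : g ∈ l.map (·.2)) :
    (PySem.Dict.mk (pvTab l)).getD g PySem.Set.empty = PySem.Set.ofList (pvGrp l g) := by
  apply PySem.Dict.getD_of_mem_items
  · simp only [pvTab]
    exact List.mem_map.mpr ⟨g, by simpa [PySem.List.dedup_eq_ofList, PySem.Set.mem_ofList] using h, rfl⟩
  · rw [pvTab_keys]
    exact PySem.List.nodup_dedup _

theorem pvFold_eq (l : List (Int × Int)) :
    l.foldl pvStep PySem.Dict.empty = PySem.Dict.mk (pvTab l) := by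
  induction l using List.reverseRecOn with
  | nil => rfl
  | append_singleton l p ih =>
    obtain ⟨i, g⟩ := p
    rw [List.foldl_append, List.foldl_cons, List.foldl_nil, ih]
    apply pvDict_ext
    by_cases hmem : g ∈ l.map (·.2)
    · -- key already present: A keeps the dict, modify overwrites the g entry in place
      have hc : (PySem.Dict.mk (pvTab l)).contains g = true := (pvTab_contains l g).mpr hmem
      show (pvStep (PySem.Dict.mk (pvTab l)) (i, g)).items = pvTab (l ++ [(i, g)])
      rw [show pvStep (PySem.Dict.mk (pvTab l)) (i, g)
            = (PySem.Dict.mk (pvTab l)).insert g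
                (PySem.Set.add ((PySem.Dict.mk (pvTab l)).getD g PySem.Set.empty)
                  ("s" ++ PySem.Int.toStr i)) from by
        simp [pvStep, hc, PySem.Dict.modify]]
      rw [PySem.Dict.items_insert_of_contains _ _ hc, pvTab_getD l g hmem]
      show List.map _ (pvTab l) = pvTab (l ++ [(i, g)])
      unfold pvTab
      rw [List.map_map]
      rw [show (l ++ [(i, g)]).map (·.2) = l.map (·.2) ++ [g] from by simp]
      simp only [PySem.List.dedup_eq_ofList]
      rw [PySem.Set.ofList_append_singleton,
        PySem.Set.add_of_mem (s := PySem.Set.ofList (List.map (fun x => x.2) l)) (x := g)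
          (by simpa [PySem.Set.mem_ofList] using hmem)]
      apply List.map_congr_left
      intro k _
      by_cases hk : k = g
      · subst hk
        simp [pvGrp_append_singleton, PySem.Set.ofList_append_singleton]
      · simp [pvGrp_append_singleton, hk]
    · -- new key: A appends (g, set()) then modify rewrites it to (g, {sample})
      have hc : (PySem.Dict.mk (pvTab l)).contains g = false := by
        rw [← Bool.not_eq_true, pvTab_contains]; exact hmem
      have hgrpnil : pvGrp l g = [] := pvGrp_nil_of_not_mem l g hmem
      show (pvStep (PySem.Dict.mk (pvTab l)) (i, g)).items = pvTab (l ++ [(i, g)])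
      rw [show pvStep (PySem.Dict.mk (pvTab l)) (i, g)
            = ((PySem.Dict.mk (pvTab l)).insert g PySem.Set.empty).insert g
                (PySem.Set.add
                  (((PySem.Dict.mk (pvTab l)).insert g PySem.Set.empty).getD g PySem.Set.empty)
                  ("s" ++ PySem.Int.toStr i)) from by
        simp [pvStep, hc, PySem.Dict.modify]]
      rw [PySem.Dict.getD_insert_self]
      have hc2 : ((PySem.Dict.mk (pvTab l)).insert g PySem.Set.empty).contains g = true :=
        PySem.Dict.contains_insert_self _ _ _
      rw [PySem.Dict.items_insert_of_contains _ _ hc2,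
        PySem.Dict.items_insert_of_not_contains _ _ hc]
      show List.map _ (pvTab l ++ [(g, PySem.Set.empty)]) = pvTab (l ++ [(i, g)])
      rw [List.map_append]
      unfold pvTab
      rw [List.map_map]
      rw [show (l ++ [(i, g)]).map (·.2) = l.map (·.2) ++ [g] from by simp]
      simp only [PySem.List.dedup_eq_ofList]
      rw [PySem.Set.ofList_append_singleton,
        PySem.Set.add_of_not_mem (s := PySem.Set.ofList (List.map (fun x => x.2) l)) (x := g)
          (by simpa [PySem.Set.mem_ofList] using hmem),
        List.map_append]
      congr 1
      · apply List.map_congr_left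
        intro k hkmem
        have hk : k ≠ g := by
          intro h; subst h
          exact hmem (by simpa [PySem.List.dedup_eq_ofList, PySem.Set.mem_ofList] using hkmem)
        simp [pvGrp_append_singleton, hk]
      · simp [pvGrp_append_singleton, hgrpnil, PySem.Set.add, PySem.Set.empty,
          PySem.Set.ofList_cons, PySem.Set.discard]

theorem pvFoldA_eq_enum (value : List Int) :
    (PySem.List.pyRange 0 value.length 1).foldl (fun d i =>
      let sample := "s" ++ PySem.Int.toStr i
      let group := PySem.List.pyGetD value i 0
      let d := if d.contains group then d else d.insert group PySem.Set.empty
      d.modify group PySem.Set.empty (fun s => PySem.Set.add s sample)) PySem.Dict.empty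
    = (PySem.List.enumerate value 0).foldl pvStep PySem.Dict.empty := by
  rw [PySem.List.enumerate_eq_map_pyRange value 0, List.foldl_map]
  rfl

-- ===== VERDICT (by name: the statement is the Claim_ definition above) =====
theorem get_predictanswer_info_spec : Claim_equal_get_predictanswer_info := by
  intro value _
  unfold Spec_get_predictanswer_info get_predictanswer_info get_predictanswer_info_alt
  have hfold := pvFoldA_eq_enum value
  simp only at hfold ⊢
  rw [hfold, pvFold_eq]
  have hsnd : (PySem.List.enumerate value 0).map (·.2) = value :=
    PySem.List.map_snd_enumerate value 0
  have htab : pvTab (PySem.List.enumerate value 0)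
      = (PySem.List.dedup value).map (fun g =>
          (g, PySem.Set.ofList (((PySem.List.enumerate value 0).filter
                (fun p => p.2 == g)).map (fun p => "s" ++ PySem.Int.toStr p.1)))) := by
    unfold pvTab pvGrp
    rw [hsnd]
  refine congrArg₂ Prod.mk ?_ (congrArg₂ Prod.mk ?_ ?_)
  · simpa [PySem.Dict.items] using htab
  · simp [PySem.Dict.size, htab]
  · rw [show (PySem.Dict.mk (pvTab (PySem.List.enumerate value 0))).keys
          = PySem.List.dedup value from by rw [pvTab_keys, hsnd]]
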